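-- pv_equiv track=rewrite | github.com/BROJ3/Ergdata_Dash | single_workout_vis.py | split_strokes_by_time_reset
-- ===== SOURCE A (Python) =====
-- def split_strokes_by_time_reset(strokes):
--     """
--     Splits stroke list into segments when the Concept2 time counter resets.
--     """
--     if not strokes:
--         return []
--
--     t_vals = [s.get("t", 0) for s in strokes]
--
--     boundaries = [0]
--     for i in range(len(t_vals) - 1):
--         if t_vals[i + 1] < t_vals[i]:
--             boundaries.append(i + 1)
--     boundaries.append(len(strokes))
--
--     segments = []
--     for a, b in zip(boundaries[:-1], boundaries[1:]):
--         seg = strokes[a:b]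
--         if seg:
--             segments.append(seg)
--     return segments
-- ===== SOURCE B (Python) =====
-- def split_strokes_by_time_reset(strokes):
--     """
--     Splits stroke list into segments when the Concept2 time counter resets.
--     Single linear pass maintaining the current segment directly.
--     """
--     if not strokes:
--         return []
--     result = []
--     current = [strokes[0]]
--     prev = strokes[0].get("t", 0)
--     for s in strokes[1:]:
--         t = s.get("t", 0)
--         if t < prev:
--             result.append(current)
--             current = [s]
--         else:
--             current.append(s)
--         prev = t
--     result.append(current)
--     return result
-- ===== Notes on version B (the rewrite author's own statement) =====
-- stated objective: simpler
-- what changed: B replaces A's two-phase boundary-index computation (build t_vals, collect reset indices, then slice between consecutive boundaries) with a single linear pass that grows the current segment directly and flushes it at each time reset.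
import Mathlib
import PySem

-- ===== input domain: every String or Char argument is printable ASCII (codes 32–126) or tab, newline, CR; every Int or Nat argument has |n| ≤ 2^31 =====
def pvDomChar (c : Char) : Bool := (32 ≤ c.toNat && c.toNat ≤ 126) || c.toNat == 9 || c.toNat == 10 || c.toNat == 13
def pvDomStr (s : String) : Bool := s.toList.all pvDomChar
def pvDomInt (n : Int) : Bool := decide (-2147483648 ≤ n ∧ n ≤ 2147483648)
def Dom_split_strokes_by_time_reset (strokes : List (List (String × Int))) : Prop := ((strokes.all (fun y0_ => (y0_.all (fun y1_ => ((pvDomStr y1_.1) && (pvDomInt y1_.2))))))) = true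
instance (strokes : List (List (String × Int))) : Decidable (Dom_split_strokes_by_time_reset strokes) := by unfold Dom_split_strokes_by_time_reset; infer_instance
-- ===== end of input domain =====

-- B does one pass keeping the running segment instead of A's boundary-index list plus slicing pass (objective: simpler).

-- shared helper: s.get("t", 0) on a stroke dict
def pvT (s : List (String × Int)) : Int := PySem.Dict.getD (PySem.Dict.mk s) "t" 0

-- ===== PORT A =====
def split_strokes_by_time_reset (strokes : List (List (String × Int))) : List (List (List (String × Int))) :=
  if strokes = [] then []
  else
    let t_vals := strokes.map (fun s => pvT s)
    let boundaries :=
      (PySem.List.pyRange 0 ((t_vals.length : Int) - 1) 1).foldl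
        (fun bs i =>
          -- t_vals[i+1] / t_vals[i]: i comes from range(len(t_vals)-1), so both indices are
          -- in range and the total pyGetD is exact here
          if PySem.List.pyGetD t_vals (i + 1) 0 < PySem.List.pyGetD t_vals i 0
          then bs ++ [i + 1] else bs) [0]
    let boundaries2 := boundaries ++ [(strokes.length : Int)]
    (boundaries2.dropLast.zip boundaries2.tail).foldl
      (fun segs ab =>
        let seg := PySem.List.slice strokes (some ab.1) (some ab.2)
        if seg ≠ [] then segs ++ [seg] else segs) []

-- ===== PORT B =====
def split_strokes_by_time_reset_alt (strokes : List (List (String × Int))) : List (List (List (String × Int))) :=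
  match strokes with
  | [] => []
  | s0 :: rest =>
    let st := rest.foldl
      (fun (acc : List (List (List (String × Int))) × List (List (String × Int)) × Int) s =>
        let t := pvT s
        if t < acc.2.2 then (acc.1 ++ [acc.2.1], [s], t) else (acc.1, acc.2.1 ++ [s], t))
      ([], [s0], pvT s0)
    st.1 ++ [st.2.1]

-- ===== PRECONDITION & SPEC =====
def Spec_split_strokes_by_time_reset (strokes : List (List (String × Int))) (out : List (List (List (String × Int)))) : Prop := out = split_strokes_by_time_reset_alt strokes
instance (strokes : List (List (String × Int))) (out : List (List (List (String × Int)))) : Decidable (Spec_split_strokes_by_time_reset strokes out) := by unfold Spec_split_strokes_by_time_reset; infer_instance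

-- ===== CLAIM (what is proved, stated in full; the proofs are below) =====
def Claim_equal_split_strokes_by_time_reset : Prop := ∀ (strokes : List (List (String × Int))), Dom_split_strokes_by_time_reset strokes → Spec_split_strokes_by_time_reset strokes (split_strokes_by_time_reset strokes)

-- ===== LEMMAS AND PROOFS =====

def pvChunks : List (List (String × Int)) → List (List (List (String × Int)))
  | [] => []
  | [s] => [[s]]
  | s :: s' :: r =>
    match pvChunks (s' :: r) with
    | [] => [[s]]
    | c :: cs => if pvT s' < pvT s then [s] :: c :: cs else (s :: c) :: cs

def pvH (prev : Int) : List (List (String × Int)) → List (List (String × Int)) × List (List (List (String × Int)))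
  | [] => ([], [])
  | s :: rest =>
    let p := pvH (pvT s) rest
    if pvT s < prev then ([], (s :: p.1) :: p.2) else (s :: p.1, p.2)

def pvPos : List Int → List Nat
  | [] => []
  | [_] => []
  | a :: b :: r =>
    if b < a then 1 :: (pvPos (b :: r)).map (· + 1) else (pvPos (b :: r)).map (· + 1)

def pvSlices (xs : List (List (String × Int))) : Nat → List Nat → List (List (List (String × Int)))
  | _, [] => []
  | a, b :: bs =>
    let seg := PySem.List.slice xs (some (a : Int)) (some (b : Int))
    if seg ≠ [] then seg :: pvSlices xs b bs else pvSlices xs b bs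

theorem pvPos_pos (ts : List Int) (x : Nat) (hx : x ∈ pvPos ts) : 1 ≤ x := by
  match ts with
  | [] => simp [pvPos] at hx
  | [_] => simp [pvPos] at hx
  | a :: b :: r =>
    simp only [pvPos] at hx
    split at hx <;> simp at hx <;> omega

theorem pvSlices_shift (cs : List Nat) (a : Nat) (s : List (String × Int))
    (xs : List (List (String × Int))) :
    pvSlices (s :: xs) (a + 1) (cs.map (· + 1)) = pvSlices xs a cs := by
  induction cs generalizing a with
  | nil => rfl
  | cons c cs ih =>
    simp only [List.map_cons, pvSlices]
    have hseg : PySem.List.slice (s :: xs) (some ((a + 1 : Nat) : Int)) (some ((c + 1 : Nat) : Int))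
        = PySem.List.slice xs (some (a : Int)) (some (c : Int)) := by
      rw [PySem.List.slice_natCast, PySem.List.slice_natCast]
      simp [Nat.succ_sub_succ]
    rw [hseg, ih]

theorem pvSlices_eq_chunks (xs : List (List (String × Int))) (hne : xs ≠ []) :
    pvSlices xs 0 (pvPos (xs.map pvT) ++ [xs.length]) = pvChunks xs := by
  induction xs with
  | nil => exact absurd rfl hne
  | cons s xs' ih =>
    cases xs' with
    | nil =>
      have hsl : PySem.List.slice [s] (some ((0:Nat):Int)) (some ((1:Nat):Int)) = [s] := by
        rw [PySem.List.slice_natCast]; rfl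
      simp only [List.map_cons, List.map_nil, pvPos, List.nil_append, List.length_cons,
        List.length_nil, pvSlices, hsl, pvChunks]
      simp
    | cons s' r =>
      have hne' : (s' :: r) ≠ [] := by simp
      have ih' := ih hne'
      simp only [List.map_cons, List.length_cons, pvPos] at ih' ⊢
      by_cases hdec : pvT s' < pvT s
      · rw [if_pos hdec]
        simp only [List.cons_append, pvSlices]
        have hsl : PySem.List.slice (s :: s' :: r) (some ((0:Nat):Int)) (some ((1:Nat):Int)) = [s] := by
          rw [PySem.List.slice_natCast]; rfl
        rw [hsl]
        simp only [ne_eq, reduceCtorEq, not_false_eq_true, if_pos]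
        have h2 : (pvPos (pvT s' :: List.map pvT r)).map (· + 1) ++ [r.length + 1 + 1]
            = ((pvPos (pvT s' :: List.map pvT r)) ++ [r.length + 1]).map (· + 1) := by
          simp
        rw [h2, show (1:Nat) = 0 + 1 from rfl, pvSlices_shift, ih']
        simp only [pvChunks]
        cases hc : pvChunks (s' :: r) with
        | nil =>
          exfalso
          rw [← ih'] at hc
          cases hp : pvPos (pvT s' :: List.map pvT r) with
          | nil =>
            rw [hp] at hc
            simp only [List.nil_append, pvSlices] at hc
            have hsl2 : PySem.List.slice (s' :: r) (some ((0:Nat):Int)) (some ((r.length + 1 : Nat):Int)) = s' :: r := by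
              rw [PySem.List.slice_natCast]; simp [List.take_of_length_le]
            rw [hsl2] at hc; simp at hc
          | cons c cs' =>
            rw [hp] at hc
            simp only [List.cons_append, pvSlices] at hc
            have hc1 : 1 ≤ c := pvPos_pos _ c (by rw [hp]; exact List.mem_cons_self)
            have hsl2 : PySem.List.slice (s' :: r) (some ((0:Nat):Int)) (some ((c : Nat):Int)) ≠ [] := by
              rw [PySem.List.slice_natCast]
              simp only [List.drop_zero, Nat.sub_zero, ne_eq, List.take_eq_nil_iff,
                reduceCtorEq, or_false]
              omega
            rw [if_pos hsl2] at hc; simp at hc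
        | cons c cs => simp [hdec]
      · rw [if_neg hdec]
        cases hp : pvPos (pvT s' :: List.map pvT r) with
        | nil =>
          have hsl : PySem.List.slice (s :: s' :: r) (some ((0:Nat):Int)) (some ((r.length + 1 + 1 : Nat):Int))
              = s :: s' :: r := by
            rw [PySem.List.slice_natCast]; simp [List.take_of_length_le]
          have hsl2 : PySem.List.slice (s' :: r) (some ((0:Nat):Int)) (some ((r.length + 1 : Nat):Int)) = s' :: r := by
            rw [PySem.List.slice_natCast]; simp [List.take_of_length_le]
          rw [hp] at ih'
          simp only [List.nil_append, pvSlices, hsl2] at ih'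
          simp only [List.map_nil, List.nil_append, pvSlices, hsl]
          simp only [ne_eq, reduceCtorEq, not_false_eq_true, if_pos] at ih' ⊢
          simp only [pvChunks, ← ih']
          simp [hdec]
        | cons c cs' =>
          have hc1 : 1 ≤ c := pvPos_pos _ c (by rw [hp]; exact List.mem_cons_self)
          simp only [List.map_cons, List.cons_append, pvSlices]
          have hsl : PySem.List.slice (s :: s' :: r) (some ((0:Nat):Int)) (some ((c + 1 : Nat):Int))
              = s :: PySem.List.slice (s' :: r) (some ((0:Nat):Int)) (some ((c : Nat):Int)) := by
            rw [PySem.List.slice_natCast, PySem.List.slice_natCast]; simp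
          rw [hsl]
          simp only [ne_eq, reduceCtorEq, not_false_eq_true, if_pos]
          have h2 : (cs'.map (· + 1)) ++ [r.length + 1 + 1] = (cs' ++ [r.length + 1]).map (· + 1) := by simp
          rw [h2, show (c+1:Nat) = c + 1 from rfl, pvSlices_shift]
          rw [hp] at ih'
          simp only [List.cons_append, pvSlices] at ih'
          have hsl2 : PySem.List.slice (s' :: r) (some ((0:Nat):Int)) (some ((c : Nat):Int)) ≠ [] := by
            rw [PySem.List.slice_natCast]
            simp only [List.drop_zero, Nat.sub_zero, ne_eq, List.take_eq_nil_iff,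
              reduceCtorEq, or_false]
            omega
          rw [if_pos hsl2] at ih'
          simp only [pvChunks]
          rw [← ih']
          simp [hdec]

theorem pvFoldIf {α β : Type} (p : α → Prop) [DecidablePred p] (f : α → β)
    (l : List α) (acc : List β) :
    l.foldl (fun acc x => if p x then acc ++ [f x] else acc) acc
      = acc ++ (l.filter (fun x => decide (p x))).map f := by
  induction l generalizing acc with
  | nil => simp
  | cons x l ih =>
    simp only [List.foldl_cons, List.filter_cons]
    by_cases h : p x
    · simp [h, ih]
    · simp [h, ih]

-- A's zip-of-consecutive-boundaries fold is pvSlices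

theorem pvZipFold (xs : List (List (String × Int))) (l : List Nat) (a : Nat)
    (acc : List (List (List (String × Int)))) :
    ((((a : Int) :: l.map (Nat.cast : Nat → Int)).dropLast.zip
      (((a : Int) :: l.map (Nat.cast : Nat → Int)).tail)).foldl
        (fun segs ab =>
          if PySem.List.slice xs (some ab.1) (some ab.2) ≠ []
          then segs ++ [PySem.List.slice xs (some ab.1) (some ab.2)] else segs) acc)
      = acc ++ pvSlices xs a l := by
  induction l generalizing a acc with
  | nil => simp [pvSlices]
  | cons b l ih =>
    rw [List.map_cons, List.dropLast_cons₂, List.tail_cons, List.zip_cons_cons, List.foldl_cons]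
    have h2 := ih b (if PySem.List.slice xs (some ((a:Nat) : Int)) (some ((b:Nat) : Int)) ≠ []
      then acc ++ [PySem.List.slice xs (some ((a:Nat) : Int)) (some ((b:Nat) : Int))] else acc)
    rw [List.tail_cons] at h2
    rw [h2]
    simp only [pvSlices]
    by_cases h : PySem.List.slice xs (some ((a:Nat) : Int)) (some ((b:Nat) : Int)) = []
    · simp [h]
    · simp [h]

theorem pvA_eq_slices (s0 : List (String × Int)) (rest : List (List (String × Int))) :
    split_strokes_by_time_reset (s0 :: rest)
      = pvSlices (s0 :: rest) 0
          ((((List.range ((s0 :: rest).length - 1)).filter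
              (fun i => (List.map pvT (s0 :: rest)).getD (i + 1) 0
                  < (List.map pvT (s0 :: rest)).getD i 0)).map (· + 1))
            ++ [(s0 :: rest).length]) := by
  have hne : ¬(s0 :: rest = []) := by simp
  simp only [split_strokes_by_time_reset, if_neg hne]
  have hlen : ((List.map pvT (s0 :: rest)).length : Int) - 1 = (((s0 :: rest).length - 1 : Nat) : Int) := by
    simp
  rw [hlen, PySem.List.pyRange_one]
  have hrange : ((((s0 :: rest).length - 1 : Nat) : Int) - 0).toNat = (s0 :: rest).length - 1 := by
    simp
  rw [hrange]
  have hmap : (List.range ((s0 :: rest).length - 1)).map (fun (k : Nat) => (0 : Int) + (k : Int))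
      = (List.range ((s0 :: rest).length - 1)).map (Nat.cast : Nat → Int) := by
    simp
  rw [hmap, List.foldl_map]
  rw [pvFoldIf (fun k : Nat => PySem.List.pyGetD (List.map pvT (s0 :: rest)) ((k : Int) + 1) 0
        < PySem.List.pyGetD (List.map pvT (s0 :: rest)) (k : Int) 0) (fun k : Nat => (k : Int) + 1)]
  have hfilt : (fun k : Nat => decide (PySem.List.pyGetD (List.map pvT (s0 :: rest)) ((k : Int) + 1) 0
        < PySem.List.pyGetD (List.map pvT (s0 :: rest)) (k : Int) 0))
      = (fun i : Nat => decide ((List.map pvT (s0 :: rest)).getD (i + 1) 0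
          < (List.map pvT (s0 :: rest)).getD i 0)) := by
    funext k
    have h1 : ((k : Int) + 1) = ((k + 1 : Nat) : Int) := by push_cast; ring
    rw [h1, PySem.List.pyGetD_natCast, PySem.List.pyGetD_natCast]
  rw [hfilt]
  have hmap2 : ∀ (l : List Nat), l.map (fun k : Nat => (k : Int) + 1) = (l.map (· + 1)).map (Nat.cast : Nat → Int) := by
    intro l; simp [List.map_map]
  rw [hmap2]
  have hall : (0 : Int) :: ((((List.range ((s0 :: rest).length - 1)).filter
              (fun i => decide ((List.map pvT (s0 :: rest)).getD (i + 1) 0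
                  < (List.map pvT (s0 :: rest)).getD i 0))).map (· + 1)).map (Nat.cast : Nat → Int))
          ++ [((s0 :: rest).length : Int)]
      = (((0 : Nat)) : Int) :: ((((List.range ((s0 :: rest).length - 1)).filter
              (fun i => decide ((List.map pvT (s0 :: rest)).getD (i + 1) 0
                  < (List.map pvT (s0 :: rest)).getD i 0))).map (· + 1)
            ++ [(s0 :: rest).length])).map (Nat.cast : Nat → Int) := by
    simp
  simp only [List.cons_append, List.nil_append] at hall ⊢
  rw [hall, pvZipFold]
  simp

theorem pvCuts_eq_pvPos (ts : List Int) :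
    ((List.range (ts.length - 1)).filter
        (fun i => ts.getD (i + 1) 0 < ts.getD i 0)).map (· + 1) = pvPos ts := by
  match ts with
  | [] => simp [pvPos]
  | [a] => simp [pvPos]
  | a :: b :: r =>
    have ih := pvCuts_eq_pvPos (b :: r)
    simp only [List.length_cons, Nat.add_sub_cancel] at *
    rw [List.range_succ_eq_map]
    simp only [pvPos, List.filter_cons]
    have hp : (fun i => decide (List.getD (a :: b :: r) (i + 1) 0 < List.getD (a :: b :: r) i 0)) ∘ Nat.succ
        = fun i => decide (List.getD (b :: r) (i + 1) 0 < List.getD (b :: r) i 0) := by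
      funext i; simp [Nat.succ_eq_add_one]
    rw [List.filter_map, hp]
    by_cases h : b < a
    · simp only [List.getD, List.getElem?_cons_zero, List.getElem?_cons_succ, Option.getD_some] at *
      simp [h, ← ih, List.map_map, Function.comp, Nat.succ_eq_add_one]
    · simp only [List.getD, List.getElem?_cons_zero, List.getElem?_cons_succ, Option.getD_some] at *
      simp [h, ← ih, List.map_map, Function.comp, Nat.succ_eq_add_one]

theorem pvB_fold (xs : List (List (String × Int)))
    (r : List (List (List (String × Int)))) (cur : List (List (String × Int))) (prev : Int) :
    (let st := xs.foldl
      (fun (acc : List (List (List (String × Int))) × List (List (String × Int)) × Int) s =>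
        let t := pvT s
        if t < acc.2.2 then (acc.1 ++ [acc.2.1], [s], t) else (acc.1, acc.2.1 ++ [s], t))
      (r, cur, prev)
     st.1 ++ [st.2.1]) = r ++ ((cur ++ (pvH prev xs).1) :: (pvH prev xs).2) := by
  induction xs generalizing r cur prev with
  | nil => simp [pvH]
  | cons s rest ih =>
    simp only [List.foldl_cons, pvH]
    by_cases h : pvT s < prev
    · simp only [h, ite_true]
      rw [ih]
      simp
    · simp only [h, ite_false]
      rw [ih]
      simp

theorem pvChunks_eq_pvH (s : List (String × Int)) (xs : List (List (String × Int))) :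
    pvChunks (s :: xs) = (s :: (pvH (pvT s) xs).1) :: (pvH (pvT s) xs).2 := by
  induction xs generalizing s with
  | nil => simp [pvChunks, pvH]
  | cons s' r ih =>
    simp only [pvChunks, pvH]
    rw [ih s']
    by_cases h : pvT s' < pvT s
    · simp [h]
    · simp [h]

theorem pvB_eq_chunks (strokes : List (List (String × Int))) :
    split_strokes_by_time_reset_alt strokes = pvChunks strokes := by
  cases strokes with
  | nil => rfl
  | cons s0 rest =>
    show _ = pvChunks (s0 :: rest)
    rw [pvChunks_eq_pvH]
    simpa using pvB_fold rest [] [s0] (pvT s0)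

theorem pvA_eq_chunks (strokes : List (List (String × Int))) :
    split_strokes_by_time_reset strokes = pvChunks strokes := by
  cases strokes with
  | nil => rfl
  | cons s0 rest =>
    have h := pvCuts_eq_pvPos ((s0 :: rest).map pvT)
    rw [List.length_map] at h
    rw [pvA_eq_slices, h, pvSlices_eq_chunks _ (by simp)]

-- ===== VERDICT (by name: the statement is the Claim_ definition above) =====
theorem split_strokes_by_time_reset_spec : Claim_equal_split_strokes_by_time_reset := by
  intro strokes _
  unfold Spec_split_strokes_by_time_reset
  rw [pvA_eq_chunks, pvB_eq_chunks]
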